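-- pv_equiv track=rewrite | github.com/mohit-rag/cae-eval | data/tw/task-6902ef3ab97fe23e2ad27275/tests/compare_test_runs.py | compare_test_runs
-- ===== SOURCE A (Python) =====
-- from typing import Dict, List, Tuple
--
-- def compare_test_runs(first_run: Dict[str, str], second_run: Dict[str, str]) -> Tuple[List[str], List[str], List[str], List[str]]:
--     """Compare two test runs and categorize the results."""
--     pass_to_fail = []
--     fail_to_pass = []
--     pass_to_pass = []
--     fail_to_fail = []
--
--     # Get all unique test names from both runs
--     all_tests = set(first_run.keys()) | set(second_run.keys())
--
--     for test_name in sorted(all_tests):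
--         first_status = first_run.get(test_name)
--         second_status = second_run.get(test_name)
--
--         # Handle cases where test only exists in one run
--         if first_status is None:
--             first_status = "FAILED"  # Assume not present = failed
--         if second_status is None:
--             second_status = "FAILED"  # Assume not present = failed
--
--         # Categorize based on status transitions
--         first_passed = first_status == "PASSED"
--         second_passed = second_status == "PASSED"
--
--         if first_passed and not second_passed:
--             pass_to_fail.append(test_name)
--         elif not first_passed and second_passed:
--             fail_to_pass.append(test_name)
--         elif first_passed and second_passed:
--             pass_to_pass.append(test_name)
--         else:  # not first_passed and not second_passed
--             fail_to_fail.append(test_name)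
--
--     return pass_to_fail, fail_to_pass, pass_to_pass, fail_to_fail
-- ===== SOURCE B (Python) =====
-- def compare_test_runs(first_run, second_run):
--     """Compare two test runs and categorize the results."""
--     tests = sorted(set(first_run) | set(second_run))
--     passed1 = lambda t: first_run.get(t) == "PASSED"
--     passed2 = lambda t: second_run.get(t) == "PASSED"
--     return ([t for t in tests if passed1(t) and not passed2(t)],
--             [t for t in tests if not passed1(t) and passed2(t)],
--             [t for t in tests if passed1(t) and passed2(t)],
--             [t for t in tests if not passed1(t) and not passed2(t)])
-- ===== Notes on version B (the rewrite author's own statement) =====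
-- stated objective: simpler
-- what changed: Replaces the single categorizing loop with four branches and a missing-key-to-FAILED normalisation step by one sorted key union plus four independent filter comprehensions over raw dict lookups.
import Mathlib
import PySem

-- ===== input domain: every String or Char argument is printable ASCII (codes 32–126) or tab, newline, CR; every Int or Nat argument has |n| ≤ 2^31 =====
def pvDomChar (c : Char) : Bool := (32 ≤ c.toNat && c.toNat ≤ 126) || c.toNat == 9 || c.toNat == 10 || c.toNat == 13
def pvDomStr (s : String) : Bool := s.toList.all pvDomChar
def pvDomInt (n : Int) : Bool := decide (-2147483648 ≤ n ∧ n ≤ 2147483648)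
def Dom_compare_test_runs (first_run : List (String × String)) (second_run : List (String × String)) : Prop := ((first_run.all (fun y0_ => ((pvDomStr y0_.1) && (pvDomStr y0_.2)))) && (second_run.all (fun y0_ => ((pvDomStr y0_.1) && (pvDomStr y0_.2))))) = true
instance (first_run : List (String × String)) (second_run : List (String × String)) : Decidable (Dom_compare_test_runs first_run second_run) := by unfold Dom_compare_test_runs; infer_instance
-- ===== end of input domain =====

-- B builds the sorted key union once and derives each of the four lists by its own
-- filter over raw dict lookups, instead of A's single categorizing loop (objective: simpler).

-- ===== PORT A =====
def compare_test_runs (first_run : List (String × String)) (second_run : List (String × String)) : List String × List String × List String × List String :=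
  let all_tests : PySem.Set String :=
    PySem.Set.union (PySem.Set.ofList (first_run.map (·.1))) (second_run.map (·.1))
  (PySem.List.sorted all_tests (fun x => x) false).foldl
    (fun acc test_name =>
      let first_status :=
        match (PySem.Dict.mk first_run).get? test_name with
        | none => "FAILED"
        | some s => s
      let second_status :=
        match (PySem.Dict.mk second_run).get? test_name with
        | none => "FAILED"
        | some s => s
      let first_passed := first_status == "PASSED"
      let second_passed := second_status == "PASSED"
      if first_passed && !second_passed then
        (acc.1 ++ [test_name], acc.2.1, acc.2.2.1, acc.2.2.2)
      else if !first_passed && second_passed then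
        (acc.1, acc.2.1 ++ [test_name], acc.2.2.1, acc.2.2.2)
      else if first_passed && second_passed then
        (acc.1, acc.2.1, acc.2.2.1 ++ [test_name], acc.2.2.2)
      else
        (acc.1, acc.2.1, acc.2.2.1, acc.2.2.2 ++ [test_name]))
    ([], [], [], [])

-- ===== PORT B =====
def compare_test_runs_alt (first_run : List (String × String)) (second_run : List (String × String)) : List String × List String × List String × List String :=
  let d1 := PySem.Dict.mk first_run
  let d2 := PySem.Dict.mk second_run
  let tests := PySem.List.sorted
    (PySem.Set.union (PySem.Set.ofList (first_run.map (·.1))) (second_run.map (·.1)))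
    (fun x => x) false
  (tests.filter (fun t => d1.get? t == some "PASSED" && !(d2.get? t == some "PASSED")),
   tests.filter (fun t => !(d1.get? t == some "PASSED") && d2.get? t == some "PASSED"),
   tests.filter (fun t => d1.get? t == some "PASSED" && d2.get? t == some "PASSED"),
   tests.filter (fun t => !(d1.get? t == some "PASSED") && !(d2.get? t == some "PASSED")))

-- ===== PRECONDITION & SPEC =====
def Spec_compare_test_runs (first_run : List (String × String)) (second_run : List (String × String)) (out : List String × List String × List String × List String) : Prop := out = compare_test_runs_alt first_run second_run
instance (first_run : List (String × String)) (second_run : List (String × String)) (out : List String × List String × List String × List String) : Decidable (Spec_compare_test_runs first_run second_run out) := by unfold Spec_compare_test_runs; infer_instance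

-- ===== CLAIM (what is proved, stated in full; the proofs are below) =====
def Claim_equal_compare_test_runs : Prop := ∀ (first_run : List (String × String)) (second_run : List (String × String)), Dom_compare_test_runs first_run second_run → Spec_compare_test_runs first_run second_run (compare_test_runs first_run second_run)

-- ===== LEMMAS AND PROOFS =====

-- the "missing key counts as FAILED" normalisation agrees with a raw get? comparison
lemma status_passed_iff (o : Option String) :
    ((match o with | none => "FAILED" | some s => s) == "PASSED") = (o == some "PASSED") := by
  cases o with
  | none => decide
  | some s => simp

-- A's categorizing fold over any list equals the four filters, for any starting accumulators
lemma fold_eq_filters (d1 d2 : PySem.Dict String String) (l : List String)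
    (a b c e : List String) :
    l.foldl
      (fun acc t =>
        if d1.get? t == some "PASSED" && !(d2.get? t == some "PASSED") then
          (acc.1 ++ [t], acc.2.1, acc.2.2.1, acc.2.2.2)
        else if !(d1.get? t == some "PASSED") && d2.get? t == some "PASSED" then
          (acc.1, acc.2.1 ++ [t], acc.2.2.1, acc.2.2.2)
        else if d1.get? t == some "PASSED" && d2.get? t == some "PASSED" then
          (acc.1, acc.2.1, acc.2.2.1 ++ [t], acc.2.2.2)
        else (acc.1, acc.2.1, acc.2.2.1, acc.2.2.2 ++ [t]))
      (a, b, c, e)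
    = (a ++ l.filter (fun t => d1.get? t == some "PASSED" && !(d2.get? t == some "PASSED")),
       b ++ l.filter (fun t => !(d1.get? t == some "PASSED") && d2.get? t == some "PASSED"),
       c ++ l.filter (fun t => d1.get? t == some "PASSED" && d2.get? t == some "PASSED"),
       e ++ l.filter (fun t => !(d1.get? t == some "PASSED") && !(d2.get? t == some "PASSED"))) := by
  induction l generalizing a b c e with
  | nil => simp
  | cons t l ih =>
    rcases hp : (d1.get? t == some "PASSED") with _ | _ <;>
      rcases hq : (d2.get? t == some "PASSED") with _ | _ <;>
      simp only [List.foldl_cons, List.filter_cons, hp, hq, Bool.false_and,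
        Bool.and_false, Bool.true_and, Bool.and_true, Bool.not_false,
        Bool.not_true, Bool.false_eq_true, if_true, if_false] <;>
      rw [ih] <;> simp

-- ===== VERDICT (by name: the statement is the Claim_ definition above) =====
theorem compare_test_runs_spec : Claim_equal_compare_test_runs := by
  intro first_run second_run _
  unfold Spec_compare_test_runs compare_test_runs compare_test_runs_alt
  simp only [status_passed_iff]
  rw [fold_eq_filters]
  simp
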